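-- pv_equiv track=rewrite | github.com/MrBrantCode/unitest_baseline | mut_generate/mist_train_cf/cf_43961/solution.py | set_intersection
-- ===== SOURCE A (Python) =====
-- def set_intersection(s1, s2):
--     class BSTNode:
--         def __init__(self, value, left=None, right=None):
--             self.value = value
--             self.left = left
--             self.right = right
--
--     class BinarySearchTree:
--         def __init__(self):
--             self.root = None
--
--         def insert(self, value):
--             if self.root is None:
--                 self.root = BSTNode(value)
--             else:
--                 self.insert_node(self.root, value)
--
--         def insert_node(self, current_node, value):
--             if value < current_node.value:
--                 if current_node.left:
--                     self.insert_node(current_node.left, value)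
--                 else:
--                     current_node.left = BSTNode(value)
--             elif value > current_node.value:
--                 if current_node.right:
--                     self.insert_node(current_node.right, value)
--                 else:
--                     current_node.right = BSTNode(value)
--
--         def in_bst(self, current_node, value):
--             if current_node is None:
--                 return False
--             if current_node.value == value:
--                 return True
--             elif current_node.value > value:
--                 return self.in_bst(current_node.left, value)
--             else:
--                 return self.in_bst(current_node.right, value)
--
--     bst = BinarySearchTree()
--     for elem in s1:
--         bst.insert(elem)
--
--     intersection = []
--     for elem in s2:
--         if bst.in_bst(bst.root, elem) and elem not in intersection:
--             intersection.append(elem)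
--
--     intersection.sort()
--     return intersection
-- ===== SOURCE B (Python) =====
-- def set_intersection(s1, s2):
--     a = sorted(s1)
--     b = sorted(s2)
--
--     def dedup(xs):
--         out = []
--         for x in xs:
--             if not out or out[-1] != x:
--                 out.append(x)
--         return out
--
--     a = dedup(a)
--     b = dedup(b)
--     res = []
--     i = 0
--     j = 0
--     while i < len(a) and j < len(b):
--         if a[i] < b[j]:
--             i += 1
--         elif b[j] < a[i]:
--             j += 1
--         else:
--             res.append(a[i])
--             i += 1
--             j += 1
--     return res
-- ===== Notes on version B (the rewrite author's own statement) =====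
-- stated objective: faster
-- what changed: Replaced the hand-rolled BST plus linear 'not in' dedup scan and a final sort by sort-dedup-then-two-pointer-merge of the two lists.
import Mathlib
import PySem

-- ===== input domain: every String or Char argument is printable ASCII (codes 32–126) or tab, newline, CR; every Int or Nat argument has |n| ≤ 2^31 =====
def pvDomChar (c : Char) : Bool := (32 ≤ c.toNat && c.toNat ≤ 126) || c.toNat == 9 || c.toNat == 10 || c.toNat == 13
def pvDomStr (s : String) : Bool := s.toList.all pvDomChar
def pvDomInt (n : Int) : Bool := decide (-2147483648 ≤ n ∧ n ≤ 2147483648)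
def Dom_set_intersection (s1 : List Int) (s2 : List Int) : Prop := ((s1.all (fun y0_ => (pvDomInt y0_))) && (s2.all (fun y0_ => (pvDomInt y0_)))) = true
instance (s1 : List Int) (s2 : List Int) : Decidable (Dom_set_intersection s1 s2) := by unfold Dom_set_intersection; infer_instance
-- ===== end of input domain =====

-- B replaces A's hand-rolled BST + linear 'not in' dedup + final sort by sort, adjacent dedup
-- and a two-pointer merge (objective: faster).

-- ===== PORT A =====
inductive BST where
  | leaf
  | node : Int → BST → BST → BST
deriving Repr

-- insert / insert_node (root-None case = leaf)
def bstInsert : BST → Int → BST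
  | .leaf, v => .node v .leaf .leaf
  | .node w l r, v =>
    if v < w then .node w (bstInsert l v) r
    else if v > w then .node w l (bstInsert r v)
    else .node w l r

def inBst : BST → Int → Bool
  | .leaf, _ => false
  | .node w l r, v =>
    if w == v then true
    else if w > v then inBst l v
    else inBst r v

def set_intersection (s1 : List Int) (s2 : List Int) : List Int :=
  let bst := s1.foldl bstInsert .leaf
  let inter := s2.foldl (fun acc e =>
    if inBst bst e && !(acc.contains e) then acc ++ [e] else acc) []
  PySem.List.sorted inter (fun x => x) false   -- intersection.sort()

-- ===== PORT B =====
-- dedup loop of Source B; 'not out or out[-1] != x' ported as getLast? ≠ some x (exact: out[-1]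
-- is only read when out is nonempty, where it is getLast?)
def pyDedup (xs : List Int) : List Int :=
  xs.foldl (fun out x => if out.getLast? ≠ some x then out ++ [x] else out) []

-- the two-pointer while loop of Source B
def mergeLoop (a b : List Int) (i j : Nat) (res : List Int) : List Int :=
  if h : i < a.length ∧ j < b.length then
    if a[i]'h.1 < b[j]'h.2 then mergeLoop a b (i+1) j res
    else if b[j]'h.2 < a[i]'h.1 then mergeLoop a b i (j+1) res
    else mergeLoop a b (i+1) (j+1) (res ++ [a[i]'h.1])
  else res
termination_by a.length - i + (b.length - j)
decreasing_by all_goals omega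

def set_intersection_alt (s1 : List Int) (s2 : List Int) : List Int :=
  let a := pyDedup (PySem.List.sorted s1 (fun x => x) false)
  let b := pyDedup (PySem.List.sorted s2 (fun x => x) false)
  mergeLoop a b 0 0 []

-- ===== PRECONDITION & SPEC =====
def Spec_set_intersection (s1 : List Int) (s2 : List Int) (out : List Int) : Prop := out = set_intersection_alt s1 s2
instance (s1 : List Int) (s2 : List Int) (out : List Int) : Decidable (Spec_set_intersection s1 s2 out) := by unfold Spec_set_intersection; infer_instance

-- ===== CLAIM (what is proved, stated in full; the proofs are below) =====
def Claim_equal_set_intersection : Prop := ∀ (s1 : List Int) (s2 : List Int), Dom_set_intersection s1 s2 → Spec_set_intersection s1 s2 (set_intersection s1 s2)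

-- ===== LEMMAS AND PROOFS =====

/-! ### A side: BST correctness -/

def elems : BST → List Int
  | .leaf => []
  | .node w l r => elems l ++ w :: elems r

def BstInv : BST → Prop
  | .leaf => True
  | .node w l r => (∀ y ∈ elems l, y < w) ∧ (∀ y ∈ elems r, w < y) ∧ BstInv l ∧ BstInv r

theorem mem_elems_insert (t : BST) (v x : Int) :
    x ∈ elems (bstInsert t v) ↔ x = v ∨ x ∈ elems t := by
  induction t with
  | leaf => simp [bstInsert, elems]
  | node w l r ihl ihr =>
    by_cases h1 : v < w
    · simp [bstInsert, h1, elems, ihl]; tauto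
    · by_cases h2 : v > w
      · simp [bstInsert, h1, h2, elems, ihr]; tauto
      · have : v = w := by omega
        subst this
        simp [bstInsert, elems]; tauto

theorem inv_insert (t : BST) (v : Int) (h : BstInv t) : BstInv (bstInsert t v) := by
  induction t with
  | leaf => simp [bstInsert, BstInv, elems]
  | node w l r ihl ihr =>
    obtain ⟨hl, hr, il, ir⟩ := h
    by_cases h1 : v < w
    · simp only [bstInsert, if_pos h1, BstInv]
      refine ⟨?_, hr, ihl il, ir⟩
      intro y hy
      rcases (mem_elems_insert l v y).1 hy with rfl | hy
      · exact h1
      · exact hl y hy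
    · by_cases h2 : v > w
      · simp only [bstInsert, if_neg h1, if_pos h2, BstInv]
        refine ⟨hl, ?_, il, ihr ir⟩
        intro y hy
        rcases (mem_elems_insert r v y).1 hy with rfl | hy
        · exact h2
        · exact hr y hy
      · have : v = w := by omega
        subst this
        simp only [bstInsert, if_neg h1, if_neg h2, BstInv]
        exact ⟨hl, hr, il, ir⟩

theorem inBst_correct (t : BST) (v : Int) (h : BstInv t) :
    inBst t v = true ↔ v ∈ elems t := by
  induction t with
  | leaf => simp [inBst, elems]
  | node w l r ihl ihr =>
    obtain ⟨hl, hr, il, ir⟩ := h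
    by_cases he : w = v
    · subst he; simp [inBst, elems]
    · by_cases hgt : w > v
      · rw [show inBst (.node w l r) v = inBst l v by simp [inBst, he, hgt], ihl il]
        simp only [elems, List.mem_append, List.mem_cons]
        constructor
        · exact fun hv => Or.inl hv
        · rintro (hv | rfl | hv)
          · exact hv
          · omega
          · exact absurd (hr v hv) (by omega)
      · rw [show inBst (.node w l r) v = inBst r v by simp [inBst, he, hgt], ihr ir]
        simp only [elems, List.mem_append, List.mem_cons]
        constructor
        · exact fun hv => Or.inr (Or.inr hv)
        · rintro (hv | rfl | hv)
          · exact absurd (hl v hv) (by omega)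
          · omega
          · exact hv

theorem foldl_insert_inv (s : List Int) (t : BST) (h : BstInv t) :
    BstInv (s.foldl bstInsert t) := by
  induction s generalizing t with
  | nil => exact h
  | cons x s ih => exact ih _ (inv_insert _ _ h)

theorem mem_foldl_insert (s : List Int) (t : BST) (x : Int) :
    x ∈ elems (s.foldl bstInsert t) ↔ x ∈ elems t ∨ x ∈ s := by
  induction s generalizing t with
  | nil => simp
  | cons y s ih => simp [List.foldl_cons, ih, mem_elems_insert]; tauto

/-! ### A side: the intersection accumulation loop -/

theorem mem_interLoop (bst : BST) (s : List Int) (acc : List Int) (x : Int) :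
    x ∈ s.foldl (fun acc e => if inBst bst e && !(acc.contains e) then acc ++ [e] else acc) acc ↔
      x ∈ acc ∨ (inBst bst x = true ∧ x ∈ s) := by
  induction s generalizing acc with
  | nil => simp
  | cons e s ih =>
    simp only [List.foldl_cons]
    by_cases hc : (inBst bst e && !(acc.contains e)) = true
    · rw [if_pos hc, ih]
      have hbe : inBst bst e = true := by
        have h' := hc
        simp only [Bool.and_eq_true] at h'
        exact h'.1
      constructor
      · rintro (h | ⟨h1, h2⟩)
        · rcases List.mem_append.1 h with h | h
          · exact Or.inl h
          · rw [List.mem_singleton] at h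
            subst h
            exact Or.inr ⟨hbe, List.mem_cons_self⟩
        · exact Or.inr ⟨h1, List.mem_cons_of_mem _ h2⟩
      · rintro (h | ⟨h1, h2⟩)
        · exact Or.inl (List.mem_append.2 (Or.inl h))
        · rcases List.mem_cons.1 h2 with rfl | h2
          · exact Or.inl (List.mem_append.2 (Or.inr (List.mem_singleton.2 rfl)))
          · exact Or.inr ⟨h1, h2⟩
    · rw [if_neg hc, ih]
      have hc' : inBst bst e = false ∨ e ∈ acc := by
        by_cases hb : inBst bst e = true
        · right
          by_contra hmem
          exact hc (by simp [hb, hmem])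
        · exact Or.inl (by simpa using hb)
      constructor
      · rintro (h | ⟨h1, h2⟩)
        · exact Or.inl h
        · exact Or.inr ⟨h1, List.mem_cons_of_mem _ h2⟩
      · rintro (h | ⟨h1, h2⟩)
        · exact Or.inl h
        · rcases List.mem_cons.1 h2 with rfl | h2
          · rcases hc' with h | h
            · rw [h] at h1
              exact absurd h1 (by simp)
            · exact Or.inl h
          · exact Or.inr ⟨h1, h2⟩

theorem nodup_interLoop (bst : BST) (s : List Int) (acc : List Int) (h : acc.Nodup) :
    (s.foldl (fun acc e => if inBst bst e && !(acc.contains e) then acc ++ [e] else acc) acc).Nodup := by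
  induction s generalizing acc with
  | nil => exact h
  | cons e s ih =>
    simp only [List.foldl_cons]
    by_cases hc : (inBst bst e && !(acc.contains e)) = true
    · rw [if_pos hc]
      refine ih _ ?_
      have hne : e ∉ acc := by
        simp only [Bool.and_eq_true, Bool.not_eq_true', List.contains_eq_mem,
          decide_eq_false_iff_not] at hc
        exact hc.2
      rw [List.nodup_append]
      refine ⟨h, List.nodup_singleton _, ?_⟩
      intro a ha b hb
      rw [List.mem_singleton] at hb
      subst hb
      exact fun hax => hne (hax ▸ ha)
    · rw [if_neg hc]
      exact ih _ h

/-! ### B side: dedup -/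

def sdedup (last : Option Int) : List Int → List Int
  | [] => []
  | x :: xs => if last = some x then sdedup last xs else x :: sdedup (some x) xs

theorem pyDedup_eq_sdedup_aux (xs out : List Int) :
    xs.foldl (fun out x => if out.getLast? ≠ some x then out ++ [x] else out) out =
      out ++ sdedup out.getLast? xs := by
  induction xs generalizing out with
  | nil => simp [sdedup]
  | cons x xs ih =>
    simp only [List.foldl_cons]
    by_cases h : out.getLast? = some x
    · rw [if_neg (not_not_intro h), ih, h]
      simp [sdedup]
    · rw [if_pos h, ih]
      have hlast : (out ++ [x]).getLast? = some x := by simp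
      rw [hlast]
      simp [sdedup, h]

theorem pyDedup_eq_sdedup (xs : List Int) : pyDedup xs = sdedup none xs := by
  have := pyDedup_eq_sdedup_aux xs []
  simpa [pyDedup] using this

def lastLE : Option Int → Int → Prop
  | none, _ => True
  | some l, y => l < y

theorem mem_sdedup (last : Option Int) (xs : List Int) (hs : xs.Pairwise (· ≤ ·))
    (hl : ∀ y ∈ xs, lastLE last y ∨ last = some y) (x : Int) :
    x ∈ sdedup last xs ↔ x ∈ xs ∧ last ≠ some x := by
  induction xs generalizing last with
  | nil => simp [sdedup]
  | cons y xs ih =>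
    have hs' := (List.pairwise_cons.1 hs).1
    have htl := (List.pairwise_cons.1 hs).2
    have hstep : ∀ z ∈ xs, lastLE (some y) z ∨ (some y : Option Int) = some z := by
      intro z hz
      by_cases hzy : y = z
      · exact Or.inr (by rw [hzy])
      · exact Or.inl (lt_of_le_of_ne (hs' z hz) hzy)
    by_cases h : last = some y
    · subst h
      rw [show sdedup (some y) (y :: xs) = sdedup (some y) xs from by simp [sdedup],
        ih (some y) htl hstep]
      simp only [List.mem_cons]
      constructor
      · rintro ⟨h1, h2⟩
        exact ⟨Or.inr h1, h2⟩
      · rintro ⟨rfl | h1, h2⟩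
        · exact absurd rfl h2
        · exact ⟨h1, h2⟩
    · simp only [sdedup, if_neg h, List.mem_cons]
      rw [ih (some y) htl hstep]
      constructor
      · rintro (rfl | ⟨h1, h2⟩)
        · exact ⟨Or.inl rfl, fun hc => h (by rw [hc])⟩
        · refine ⟨Or.inr h1, fun hc => ?_⟩
          rcases hl x (List.mem_cons_of_mem _ h1) with hlt | he
          · rw [hc] at hlt
            simp [lastLE] at hlt
          · rcases hl y (List.mem_cons_self ..) with hlty | hey
            · rw [hc] at hlty
              have hyx : y ≤ x := hs' x h1
              simp only [lastLE] at hlty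
              omega
            · exact h hey
      · rintro ⟨rfl | h1, h2⟩
        · exact Or.inl rfl
        · by_cases hxy : x = y
          · exact Or.inl hxy
          · exact Or.inr ⟨h1, fun hc => hxy (Option.some.inj hc).symm⟩

theorem pairwise_sdedup (last : Option Int) (xs : List Int) (hs : xs.Pairwise (· ≤ ·)) :
    (sdedup last xs).Pairwise (· < ·) := by
  induction xs generalizing last with
  | nil => simp [sdedup]
  | cons y xs ih =>
    have hs' := (List.pairwise_cons.1 hs).1
    have htl := (List.pairwise_cons.1 hs).2
    have hstep : ∀ z ∈ xs, lastLE (some y) z ∨ (some y : Option Int) = some z := by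
      intro z hz
      by_cases hzy : y = z
      · exact Or.inr (by rw [hzy])
      · exact Or.inl (lt_of_le_of_ne (hs' z hz) hzy)
    by_cases h : last = some y
    · simpa [sdedup, h] using ih last htl
    · simp only [sdedup, if_neg h, List.pairwise_cons]
      refine ⟨?_, ih (some y) htl⟩
      intro z hz
      have hmem := (mem_sdedup (some y) xs htl hstep z).1 hz
      exact lt_of_le_of_ne (hs' z hmem.1) fun hc => hmem.2 (by rw [hc])

theorem mem_pyDedup_sorted (s : List Int) (x : Int) :
    x ∈ pyDedup (PySem.List.sorted s (fun x => x) false) ↔ x ∈ s := by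
  rw [pyDedup_eq_sdedup,
    mem_sdedup none _ (PySem.List.sorted_pairwise s (fun x => x)) (fun y _ => Or.inl trivial)]
  simp [PySem.List.mem_sorted]

theorem pairwise_pyDedup_sorted (s : List Int) :
    (pyDedup (PySem.List.sorted s (fun x => x) false)).Pairwise (· < ·) := by
  rw [pyDedup_eq_sdedup]
  exact pairwise_sdedup none _ (PySem.List.sorted_pairwise s (fun x => x))

/-! ### B side: merge -/

def smerge : List Int → List Int → List Int
  | x :: xs, y :: ys =>
    if x < y then smerge xs (y :: ys)
    else if y < x then smerge (x :: xs) ys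
    else x :: smerge xs ys
  | _, _ => []
termination_by a b => a.length + b.length

theorem mergeLoop_eq_smerge (a b : List Int) (i j : Nat) (res : List Int) :
    mergeLoop a b i j res = res ++ smerge (a.drop i) (b.drop j) := by
  induction i, j, res using mergeLoop.induct a b with
  | case1 i j res h h1 ih =>
    rw [mergeLoop, dif_pos h, if_pos h1, ih,
      ← List.getElem_cons_drop h.1, ← List.getElem_cons_drop h.2, smerge, if_pos h1]
  | case2 i j res h h1 h2 ih =>
    rw [mergeLoop, dif_pos h, if_neg h1, if_pos h2, ih,
      ← List.getElem_cons_drop h.1, ← List.getElem_cons_drop h.2, smerge, if_neg h1, if_pos h2]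
  | case3 i j res h h1 h2 ih =>
    rw [mergeLoop, dif_pos h, if_neg h1, if_neg h2, ih,
      ← List.getElem_cons_drop h.1, ← List.getElem_cons_drop h.2, smerge, if_neg h1, if_neg h2]
    simp
  | case4 i j res h =>
    rw [mergeLoop, dif_neg h]
    rcases Nat.lt_or_ge i a.length with hi | hi
    · have hj : b.length ≤ j := by omega
      rw [List.drop_eq_nil_of_le hj, ← List.getElem_cons_drop hi]
      simp [smerge]
    · rw [List.drop_eq_nil_of_le hi]
      cases hb : b.drop j <;> simp [smerge]

theorem mem_smerge (xs ys : List Int) (hx : xs.Pairwise (· < ·)) (hy : ys.Pairwise (· < ·))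
    (z : Int) : z ∈ smerge xs ys ↔ z ∈ xs ∧ z ∈ ys := by
  induction xs, ys using smerge.induct with
  | case1 x xs y ys h ih =>
    rw [smerge, if_pos h, ih (List.pairwise_cons.1 hx).2 hy]
    simp only [List.mem_cons]
    constructor
    · rintro ⟨h1, h2⟩
      exact ⟨Or.inr h1, h2⟩
    · rintro ⟨rfl | h1, h2⟩
      · rcases h2 with rfl | h2
        · omega
        · have := (List.pairwise_cons.1 hy).1 z h2
          omega
      · exact ⟨h1, h2⟩
  | case2 x xs y ys h1 h2 ih =>
    rw [smerge, if_neg h1, if_pos h2, ih hx (List.pairwise_cons.1 hy).2]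
    simp only [List.mem_cons]
    constructor
    · rintro ⟨ha, hb⟩
      exact ⟨ha, Or.inr hb⟩
    · rintro ⟨ha, rfl | hb⟩
      · rcases ha with rfl | ha
        · omega
        · have := (List.pairwise_cons.1 hx).1 z ha
          omega
      · exact ⟨ha, hb⟩
  | case3 x xs y ys h1 h2 ih =>
    have hxy : x = y := by omega
    subst hxy
    rw [smerge, if_neg h1, if_neg h2]
    simp only [List.mem_cons, ih (List.pairwise_cons.1 hx).2 (List.pairwise_cons.1 hy).2]
    constructor
    · rintro (rfl | ⟨ha, hb⟩)
      · exact ⟨Or.inl rfl, Or.inl rfl⟩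
      · exact ⟨Or.inr ha, Or.inr hb⟩
    · rintro ⟨rfl | ha, hb⟩
      · exact Or.inl rfl
      · rcases hb with rfl | hb
        · have := (List.pairwise_cons.1 hx).1 z ha
          omega
        · exact Or.inr ⟨ha, hb⟩
  | case4 xs ys h =>
    cases xs with
    | nil => simp [smerge]
    | cons x xs =>
      cases ys with
      | nil => simp [smerge]
      | cons y ys => exact (h x xs y ys rfl rfl).elim

theorem pairwise_smerge (xs ys : List Int) (hx : xs.Pairwise (· < ·)) (hy : ys.Pairwise (· < ·)) :
    (smerge xs ys).Pairwise (· < ·) := by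
  induction xs, ys using smerge.induct with
  | case1 x xs y ys h ih =>
    rw [smerge, if_pos h]
    exact ih (List.pairwise_cons.1 hx).2 hy
  | case2 x xs y ys h1 h2 ih =>
    rw [smerge, if_neg h1, if_pos h2]
    exact ih hx (List.pairwise_cons.1 hy).2
  | case3 x xs y ys h1 h2 ih =>
    rw [smerge, if_neg h1, if_neg h2]
    have htx := (List.pairwise_cons.1 hx).2
    have hty := (List.pairwise_cons.1 hy).2
    refine List.pairwise_cons.2 ⟨?_, ih htx hty⟩
    intro z hz
    exact (List.pairwise_cons.1 hx).1 z ((mem_smerge xs ys htx hty z).1 hz).1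
  | case4 xs ys h =>
    cases xs with
    | nil => simp [smerge]
    | cons x xs =>
      cases ys with
      | nil => simp [smerge]
      | cons y ys => exact (h x xs y ys rfl rfl).elim

/-! ### Putting it together -/

theorem set_intersection_eq (s1 s2 : List Int) :
    set_intersection s1 s2 = set_intersection_alt s1 s2 := by
  simp only [set_intersection, set_intersection_alt]
  rw [mergeLoop_eq_smerge]
  simp only [List.drop_zero, List.nil_append]
  set d1 := pyDedup (PySem.List.sorted s1 (fun x => x) false) with hd1
  set d2 := pyDedup (PySem.List.sorted s2 (fun x => x) false) with hd2
  have p1 : d1.Pairwise (· < ·) := pairwise_pyDedup_sorted s1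
  have p2 : d2.Pairwise (· < ·) := pairwise_pyDedup_sorted s2
  set inter := s2.foldl
    (fun acc e => if inBst (s1.foldl bstInsert .leaf) e && !(acc.contains e) then acc ++ [e] else acc) []
    with hinter
  have hM : (smerge d1 d2).Pairwise (· < ·) := pairwise_smerge _ _ p1 p2
  have hmemM : ∀ z, z ∈ smerge d1 d2 ↔ z ∈ s1 ∧ z ∈ s2 := by
    intro z
    rw [mem_smerge _ _ p1 p2, hd1, hd2, mem_pyDedup_sorted, mem_pyDedup_sorted]
  have hinv : BstInv (s1.foldl bstInsert .leaf) := foldl_insert_inv s1 .leaf trivial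
  have hmemL : ∀ z, z ∈ inter ↔ z ∈ s1 ∧ z ∈ s2 := by
    intro z
    rw [hinter, mem_interLoop]
    simp only [List.not_mem_nil, false_or]
    rw [inBst_correct _ _ hinv, mem_foldl_insert]
    simp [elems]
  have hperm : (smerge d1 d2).Perm inter := by
    rw [List.perm_ext_iff_of_nodup hM.nodup
      (nodup_interLoop _ _ _ List.nodup_nil)]
    intro z
    rw [hmemM z, hmemL z]
  exact PySem.List.sorted_eq_of_perm_of_pairwise_lt _ _ _ hperm hM

-- ===== VERDICT (by name: the statement is the Claim_ definition above) =====
theorem set_intersection_spec : Claim_equal_set_intersection := by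
  intro s1 s2 _
  show set_intersection s1 s2 = set_intersection_alt s1 s2
  exact set_intersection_eq s1 s2
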